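-- pv_equiv track=rewrite | github.com/isabert/google_foobar | level2/Lovely Lucky LAMBs/solution.py | solution
-- ===== SOURCE A (Python) =====
-- def solution(total_lambs):
--     # pay generously: 2^n
--     # pay stingyly: fibonacci series
--     res_min = 0
--     res_max = 0
--
--     t = total_lambs
--     pay = 1
--     while(t>=pay):
--         t-=pay
--         pay*=2
--         res_min+=1
--
--
--     t = total_lambs
--     pay_prev = 1
--     pay_cur = 1
--
--     if(t>2):
--         res_max+=2
--         t-=2
--         while(t>=(pay_prev+pay_cur)):
--             t-=(pay_prev+pay_cur)
--             t2 = pay_cur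
--             pay_cur+=pay_prev
--             pay_prev = t2
--             res_max+=1
--     else:
--         res_max = t
--
--     return res_max-res_min
-- ===== SOURCE B (Python) =====
-- def solution(total_lambs):
--     # min henchmen (generous 2^n pay) in closed form via bit_length;
--     # max henchmen by a uniform greedy walk over the Fibonacci pays 1,1,2,3,5,...
--     if total_lambs >= 0:
--         res_min = (total_lambs + 1).bit_length() - 1
--     else:
--         res_min = 0
--     if total_lambs <= 2:
--         return total_lambs - res_min
--     t = total_lambs
--     a, b = 1, 1
--     res_max = 0
--     while t >= a:
--         t -= a
--         a, b = b, a + b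
--         res_max += 1
--     return res_max - res_min
-- ===== Notes on version B (the rewrite author's own statement) =====
-- stated objective: alternative
-- what changed: res_min's doubling loop is replaced by the closed-form bit_length formula (total_lambs+1).bit_length()-1 (guarded to 0 for negatives), and A's special-cased Fibonacci loop (init res_max=2, t-=2, then pay_prev/pay_cur updates) is replaced by one uniform greedy loop over the pays 1,1,2,3,5,... with an early return of total_lambs - res_min when total_lambs <= 2.
import Mathlib
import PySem

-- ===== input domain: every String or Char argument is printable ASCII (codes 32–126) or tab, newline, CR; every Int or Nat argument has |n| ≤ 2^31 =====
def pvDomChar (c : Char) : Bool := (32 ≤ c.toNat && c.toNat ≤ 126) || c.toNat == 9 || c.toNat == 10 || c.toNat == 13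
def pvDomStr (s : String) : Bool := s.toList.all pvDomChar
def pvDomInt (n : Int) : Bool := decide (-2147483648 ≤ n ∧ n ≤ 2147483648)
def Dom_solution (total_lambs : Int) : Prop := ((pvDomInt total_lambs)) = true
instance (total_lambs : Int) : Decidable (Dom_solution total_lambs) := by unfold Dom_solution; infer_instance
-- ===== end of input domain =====

-- B replaces A's doubling loop for res_min by a closed-form bit_length formula and
-- A's special-cased Fibonacci loop by one uniform greedy loop (objective: alternative).

-- ===== PORT A =====
-- A's first while loop: while t >= pay: t -= pay; pay *= 2; res += 1
-- (fuel is a totality device only: each iteration decreases t by pay ≥ 1,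
--  so fuel = t.toNat + 1 never runs out)
def solLoopMin : Nat → Int → Int → Int → Int
  | 0, _, _, res => res
  | fuel + 1, t, pay, res =>
    if pay ≤ t then solLoopMin fuel (t - pay) (pay * 2) (res + 1) else res

-- A's second while loop: while t >= pp+pc: t -= pp+pc; (pp, pc) = (pc, pc+pp); res += 1
def solLoopMax : Nat → Int → Int → Int → Int → Int
  | 0, _, _, _, res => res
  | fuel + 1, t, pp, pc, res =>
    if pp + pc ≤ t then solLoopMax fuel (t - (pp + pc)) pc (pc + pp) (res + 1) else res

def solution (total_lambs : Int) : Int :=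
  let res_min := solLoopMin (total_lambs.toNat + 1) total_lambs 1 0
  let res_max :=
    if total_lambs > 2 then
      solLoopMax ((total_lambs - 2).toNat + 1) (total_lambs - 2) 1 1 2
    else total_lambs
  res_max - res_min

-- ===== PORT B =====
-- B's greedy loop: while t >= a: t -= a; (a, b) = (b, a+b); res += 1  (same fuel device)
def solAltLoop : Nat → Int → Int → Int → Int → Int
  | 0, _, _, _, res => res
  | fuel + 1, t, a, b, res =>
    if a ≤ t then solAltLoop fuel (t - a) b (a + b) (res + 1) else res

-- For total_lambs ≥ 0, Python's (total_lambs+1).bit_length() - 1 equals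
-- Nat.log2 of (total_lambs+1). This port is exact there (and B's negative branch is literal).
def solution_alt (total_lambs : Int) : Int :=
  let res_min : Int :=
    if total_lambs ≥ 0 then ((Nat.log2 (total_lambs + 1).toNat : ℕ) : Int) else 0
  if total_lambs ≤ 2 then total_lambs - res_min
  else solAltLoop (total_lambs.toNat + 1) total_lambs 1 1 0 - res_min

-- ===== PRECONDITION & SPEC =====
def Spec_solution (total_lambs : Int) (out : Int) : Prop := out = solution_alt total_lambs
instance (total_lambs : Int) (out : Int) : Decidable (Spec_solution total_lambs out) := by unfold Spec_solution; infer_instance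

-- ===== CLAIM (what is proved, stated in full; the proofs are below) =====
def Claim_equal_solution : Prop := ∀ (total_lambs : Int), Dom_solution total_lambs → Spec_solution total_lambs (solution total_lambs)

-- ===== LEMMAS AND PROOFS =====

-- A's doubling loop, started at pay = 2^k on a nonnegative t with enough fuel, counts
-- Nat.log2 (t + 2^k) - k further steps.
theorem solLoopMin_log2 :
    ∀ (fuel : ℕ) (t : Int) (k : ℕ) (res : Int), 0 ≤ t → t.toNat < fuel →
      solLoopMin fuel t ((2:Int)^k) res
        = res + ((Nat.log2 (t.toNat + 2^k) - k : ℕ) : Int) := by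
  intro fuel
  induction fuel with
  | zero => intro t k res ht hf; omega
  | succ fuel ih =>
    intro t k res ht hf
    have hpowcast : ((2:Int)^k) = (((2:ℕ)^k : ℕ) : Int) := by push_cast; ring
    have hpow1 : (1:ℕ) ≤ 2^k := Nat.one_le_two_pow
    simp only [solLoopMin]
    split
    · rename_i h
      rw [show (2:Int)^k * 2 = (2:Int)^(k+1) from by ring]
      rw [ih (t - 2^k) (k+1) (res + 1) (by omega) (by omega)]
      have hsum : (t - 2^k).toNat + 2^(k+1) = t.toNat + 2^k := by
        have : (2:ℕ)^(k+1) = 2 * 2^k := by ring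
        omega
      rw [hsum]
      -- t ≥ 2^k, so t.toNat + 2^k ≥ 2^(k+1), hence log2 ≥ k+1
      have hge : 2^(k+1) ≤ t.toNat + 2^k := by
        have : (2:ℕ)^(k+1) = 2 * 2^k := by ring
        omega
      have hlog : k + 1 ≤ Nat.log2 (t.toNat + 2^k) := by
        rw [Nat.log2_eq_log_two]
        exact (Nat.le_log_iff_pow_le (by norm_num) (by omega)).2 hge
      omega
    · rename_i h
      -- t < 2^k, so 2^k ≤ t.toNat + 2^k < 2^(k+1) and log2 = k
      have hlog : Nat.log2 (t.toNat + 2^k) = k := by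
        rw [Nat.log2_eq_log_two]
        apply Nat.log_eq_of_pow_le_of_lt_pow (by omega)
        have : (2:ℕ)^(k+1) = 2 * 2^k := by ring
        omega
      rw [hlog]
      simp

-- A's Fibonacci loop equals B's greedy loop under the correspondence a = pp+pc, b = pp+2pc.
theorem solLoopMax_eq_alt :
    ∀ (fuel : ℕ) (t pp pc res a b : Int), a = pp + pc → b = pp + 2 * pc →
      solLoopMax fuel t pp pc res = solAltLoop fuel t a b res := by
  intro fuel
  induction fuel with
  | zero => intro t pp pc res a b hA hB; rfl
  | succ fuel ih =>
    intro t pp pc res a b hA hB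
    simp only [solLoopMax, solAltLoop]
    by_cases h : pp + pc ≤ t
    · rw [if_pos h, if_pos (show a ≤ t by omega),
        show t - (pp + pc) = t - a from by omega]
      exact ih (t - a) pc (pc + pp) (res + 1) b (a + b) (by omega) (by omega)
    · rw [if_neg h, if_neg (show ¬ a ≤ t by omega)]

-- ===== VERDICT (by name: the statement is the Claim_ definition above) =====
theorem solution_spec : Claim_equal_solution := by
  intro total_lambs _
  unfold Spec_solution solution solution_alt
  by_cases hneg : total_lambs ≥ 0
  · -- res_min agreement via the closed form
    have hmin : solLoopMin (total_lambs.toNat + 1) total_lambs 1 0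
        = ((Nat.log2 (total_lambs + 1).toNat : ℕ) : Int) := by
      have := solLoopMin_log2 (total_lambs.toNat + 1) total_lambs 0 0 hneg (by omega)
      simp only [pow_zero] at this
      rw [this, show (total_lambs + 1).toNat = total_lambs.toNat + 1 from by omega]
      simp
    by_cases h2 : total_lambs ≤ 2
    · -- A: res_max = total_lambs; B: early return total_lambs - res_min
      rw [if_neg (by omega : ¬ total_lambs > 2), if_pos h2, if_pos hneg, hmin]
    · rw [if_pos (by omega : total_lambs > 2), if_neg h2, if_pos hneg, hmin]
      -- peel B's loop twice: (total, 1, 1, 0) → (total-1, 1, 2, 1) → (total-2, 2, 3, 2)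
      obtain ⟨m, hm⟩ : ∃ m, total_lambs.toNat = m + 1 := ⟨total_lambs.toNat - 1, by omega⟩
      have halt : solAltLoop (total_lambs.toNat + 1) total_lambs 1 1 0
          = solAltLoop m (total_lambs - 2) 2 3 2 := by
        rw [hm]
        simp only [solAltLoop, if_pos (show (1:Int) ≤ total_lambs by omega),
          if_pos (show (1:Int) ≤ total_lambs - 1 by omega)]
        norm_num
        rw [show total_lambs - 1 - 1 = total_lambs - 2 from by ring]
      rw [halt, show (total_lambs - 2).toNat + 1 = m from by omega,
        solLoopMax_eq_alt m (total_lambs - 2) 1 1 2 2 3 (by norm_num) (by norm_num)]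
  · -- negative input: A's first loop does nothing, A returns total_lambs - 0
    simp only [solLoopMin, if_neg (show ¬ (1:Int) ≤ total_lambs by omega)]
    rw [if_neg (by omega : ¬ total_lambs > 2), if_pos (by omega : total_lambs ≤ 2),
      if_neg hneg]
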